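-- pv_equiv track=rewrite | github.com/geomech-project/voids | scripts/sync_deps.py | _bracket_delta_outside_quotes
-- ===== SOURCE A (Python) =====
-- def _bracket_delta_outside_quotes(text: str) -> int:
--     """Return net square-bracket delta, ignoring brackets inside strings."""
--
--     delta = 0
--     in_string = False
--     escaped = False
--     for ch in text:
--         if in_string:
--             if escaped:
--                 escaped = False
--                 continue
--             if ch == "\\":
--                 escaped = True
--                 continue
--             if ch == '"':
--                 in_string = False
--             continue
--         if ch == '"':
--             in_string = True
--             continue
--         if ch == "[":
--             delta += 1
--         elif ch == "]":
--             delta -= 1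
--     return delta
-- ===== SOURCE B (Python) =====
-- def _bracket_delta_outside_quotes(text: str) -> int:
--     """Strip quoted string literals, then count brackets in what is left."""
--     kept = []
--     it = iter(text)
--     for ch in it:
--         if ch == '"':
--             for ch2 in it:
--                 if ch2 == '\\':
--                     next(it, None)
--                 elif ch2 == '"':
--                     break
--         else:
--             kept.append(ch)
--     return kept.count('[') - kept.count(']')
-- ===== Notes on version B (the rewrite author's own statement) =====
-- stated objective: alternative
-- what changed: B strips quoted string literals in a nested-loop pass over a shared iterator (skipping escape pairs inline) and then counts '[' minus ']' on the stripped characters, replacing A's single-pass per-character delta with in_string/escaped boolean flags.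
import Mathlib
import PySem

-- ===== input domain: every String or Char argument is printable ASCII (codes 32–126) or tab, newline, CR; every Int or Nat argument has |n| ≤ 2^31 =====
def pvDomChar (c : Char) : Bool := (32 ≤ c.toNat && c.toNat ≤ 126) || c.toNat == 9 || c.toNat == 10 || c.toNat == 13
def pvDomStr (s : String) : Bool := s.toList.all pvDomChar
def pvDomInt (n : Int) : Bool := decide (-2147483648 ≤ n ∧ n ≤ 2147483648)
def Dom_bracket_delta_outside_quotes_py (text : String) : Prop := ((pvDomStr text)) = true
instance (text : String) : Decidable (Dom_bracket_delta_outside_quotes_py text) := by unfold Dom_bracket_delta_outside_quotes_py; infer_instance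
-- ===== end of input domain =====

-- B strips quoted string literals (nested loop over a shared iterator) and then counts
-- brackets on the stripped text, instead of A's single-pass flag state machine.


-- ===== PORT A =====
-- the body of A's for-loop over (delta, in_string, escaped), branches in A's order
def pvStepA (st : Int × Bool × Bool) (ch : Char) : Int × Bool × Bool :=
  let delta := st.1
  let in_string := st.2.1
  let escaped := st.2.2
  if in_string then
    if escaped then (delta, in_string, false)
    else if ch = '\\' then (delta, in_string, true)
    else if ch = '"' then (delta, false, escaped)
    else (delta, in_string, escaped)
  else if ch = '"' then (delta, true, escaped)
  else if ch = '[' then (delta + 1, in_string, escaped)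
  else if ch = ']' then (delta - 1, in_string, escaped)
  else (delta, in_string, escaped)

def bracket_delta_outside_quotes_py (text : String) : Int :=
  (text.toList.foldl pvStepA (0, false, false)).1

-- ===== PORT B =====
-- outer loop: keep chars until '"'; inner loop: skip a string literal ('\\' consumes the next char)
mutual
def pvStrip : List Char → List Char
  | [] => []
  | c :: r => if c = '"' then pvSkip r else c :: pvStrip r
def pvSkip : List Char → List Char
  | [] => []
  | c :: r => if c = '\\' then pvSkipEsc r else if c = '"' then pvStrip r else pvSkip r
def pvSkipEsc : List Char → List Char
  | [] => []
  | _ :: r => pvSkip r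
end

def bracket_delta_outside_quotes_py_alt (text : String) : Int :=
  let kept := pvStrip text.toList
  (kept.count '[' : Int) - (kept.count ']' : Int)

-- ===== PRECONDITION & SPEC =====
def Spec_bracket_delta_outside_quotes_py (text : String) (out : Int) : Prop := out = bracket_delta_outside_quotes_py_alt text
instance (text : String) (out : Int) : Decidable (Spec_bracket_delta_outside_quotes_py text out) := by unfold Spec_bracket_delta_outside_quotes_py; infer_instance

-- ===== CLAIM (what is proved, stated in full; the proofs are below) =====
def Claim_equal_bracket_delta_outside_quotes_py : Prop := ∀ (text : String), Dom_bracket_delta_outside_quotes_py text → Spec_bracket_delta_outside_quotes_py text (bracket_delta_outside_quotes_py text)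

-- ===== LEMMAS AND PROOFS =====

def pvBd (l : List Char) : Int := (l.count '[' : Int) - (l.count ']' : Int)

theorem pvBd_cons (c : Char) (l : List Char) :
    pvBd (c :: l) = (if c = '[' then 1 else if c = ']' then -1 else 0) + pvBd l := by
  simp only [pvBd, List.count_cons]
  by_cases h1 : c = '['
  · simp [h1]; omega
  · by_cases h2 : c = ']' <;> simp [h1, h2] <;> omega

theorem pvMain (l : List Char) : ∀ d : Int,
    ((l.foldl pvStepA (d, false, false)).1 = d + pvBd (pvStrip l)) ∧
    ((l.foldl pvStepA (d, true, false)).1 = d + pvBd (pvSkip l)) ∧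
    ((l.foldl pvStepA (d, true, true)).1 = d + pvBd (pvSkipEsc l)) := by
  induction l with
  | nil => intro d; simp [pvStrip, pvSkip, pvSkipEsc, pvBd]
  | cons c r ih =>
    intro d
    refine ⟨?_, ?_, ?_⟩
    · -- outside a string
      by_cases hq : c = '"'
      · simp [List.foldl_cons, pvStepA, pvStrip, hq, (ih d).2.1]
      · by_cases hl : c = '['
        · simp [List.foldl_cons, pvStepA, pvStrip, hq, hl, (ih (d+1)).1, pvBd_cons]; ring
        · by_cases hr : c = ']'
          · simp [List.foldl_cons, pvStepA, pvStrip, hq, hl, hr, (ih (d-1)).1, pvBd_cons]; ring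
          · simp [List.foldl_cons, pvStepA, pvStrip, hq, hl, hr, (ih d).1, pvBd_cons]
    · -- inside a string, not escaped
      by_cases hb : c = '\\'
      · simp [List.foldl_cons, pvStepA, pvSkip, hb, (ih d).2.2]
      · by_cases hq : c = '"'
        · simp [List.foldl_cons, pvStepA, pvSkip, hb, hq, (ih d).1]
        · simp [List.foldl_cons, pvStepA, pvSkip, hb, hq, (ih d).2.1]
    · -- inside a string, just after a backslash
      simp [List.foldl_cons, pvStepA, pvSkipEsc, (ih d).2.1]

-- ===== VERDICT (by name: the statement is the Claim_ definition above) =====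
theorem bracket_delta_outside_quotes_py_spec : Claim_equal_bracket_delta_outside_quotes_py := by
  intro text _
  unfold Spec_bracket_delta_outside_quotes_py bracket_delta_outside_quotes_py bracket_delta_outside_quotes_py_alt
  have h := (pvMain text.toList 0).1
  simpa [pvBd] using h
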